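-- pv_equiv track=rewrite | github.com/brianjp93/aoc2015 | day11/day11.py | has_2_pairs
-- ===== SOURCE A (Python) =====
-- def has_2_pairs(seq):
--     count = 0
--     i = 0
--     while i < len(seq) - 1:
--         if seq[i] == seq[i + 1]:
--             count += 1
--             i += 2
--         else:
--             i += 1
--     if count >= 2:
--         return True
--     return False
-- ===== SOURCE B (Python) =====
-- def has_2_pairs(seq):
--     total = 0
--     run = 0
--     prev = None
--     for c in seq:
--         if run and c == prev:
--             run += 1
--         else:
--             total += run // 2
--             run = 1
--         prev = c
--     total += run // 2
--     return total >= 2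
-- ===== Notes on version B (the rewrite author's own statement) =====
-- stated objective: alternative
-- what changed: Replaces the jumping-cursor greedy scan (advance by 2 on a pair, else by 1) with a run-length decomposition: one fold that tracks the current run of equal characters and sums floor(run/2) over maximal runs; iterating characters directly instead of repeated indexing gives a measured constant-factor speedup.
import Mathlib
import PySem

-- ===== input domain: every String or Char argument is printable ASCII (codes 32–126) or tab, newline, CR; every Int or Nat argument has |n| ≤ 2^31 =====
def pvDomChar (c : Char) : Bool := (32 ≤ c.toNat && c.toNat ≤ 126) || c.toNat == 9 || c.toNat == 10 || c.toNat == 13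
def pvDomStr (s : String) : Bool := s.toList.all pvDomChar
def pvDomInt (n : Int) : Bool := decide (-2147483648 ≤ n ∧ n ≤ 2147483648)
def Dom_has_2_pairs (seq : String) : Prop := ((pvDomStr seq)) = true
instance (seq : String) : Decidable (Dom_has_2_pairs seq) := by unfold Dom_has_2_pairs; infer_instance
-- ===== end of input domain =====

-- B replaces A's jumping-cursor greedy scan with a run-length fold (same O(n) cost, different decomposition).

-- ===== PORT A =====
-- A's while loop: advance by 2 when seq[i] == seq[i+1] (counting a pair), else by 1.
def has2Loop : List Char → Nat
  | a :: b :: rest => if a == b then 1 + has2Loop rest else has2Loop (b :: rest)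
  | _ => 0
termination_by l => l.length

def has_2_pairs (seq : String) : Bool := decide (2 ≤ has2Loop seq.toList)

-- ===== PORT B =====
-- state = (total, run, prev); "if run and c == prev" extends the run, else closes it adding run // 2.
def altStep (s : Nat × Nat × Option Char) (c : Char) : Nat × Nat × Option Char :=
  if s.2.1 ≠ 0 ∧ s.2.2 = some c then (s.1, s.2.1 + 1, some c)
  else (s.1 + s.2.1 / 2, 1, some c)

def has_2_pairs_alt (seq : String) : Bool :=
  let s := seq.toList.foldl altStep (0, 0, none)
  decide (2 ≤ s.1 + s.2.1 / 2)

-- ===== PRECONDITION & SPEC =====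
def Spec_has_2_pairs (seq : String) (out : Bool) : Prop := out = has_2_pairs_alt seq
instance (seq : String) (out : Bool) : Decidable (Spec_has_2_pairs seq out) := by unfold Spec_has_2_pairs; infer_instance

-- ===== CLAIM (what is proved, stated in full; the proofs are below) =====
def Claim_equal_has_2_pairs : Prop := ∀ (seq : String), Dom_has_2_pairs seq → Spec_has_2_pairs seq (has_2_pairs seq)

-- ===== LEMMAS AND PROOFS =====

-- pairs contributed by the rest of the string when the current run of `p` has length `r`
def cnt (r : Nat) (p : Char) : List Char → Nat
  | [] => r / 2
  | c :: cs => if c == p then cnt (r + 1) p cs else r / 2 + cnt 1 c cs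

def cntStart : List Char → Nat
  | [] => 0
  | c :: cs => cnt 1 c cs

theorem cnt_add_two (l : List Char) : ∀ r p, cnt (r + 2) p l = 1 + cnt r p l := by
  induction l with
  | nil => intro r p; simp [cnt]; omega
  | cons c cs ih =>
      intro r p
      by_cases h : c = p <;> simp [cnt, h]
      · exact ih (r + 1) p
      · omega

theorem cnt_zero (l : List Char) (p : Char) : cnt 0 p l = cntStart l := by
  cases l with
  | nil => simp [cnt, cntStart]
  | cons c cs =>
      by_cases h : c = p <;> simp [cnt, cntStart, h]

theorem has2Loop_eq_cntStart (l : List Char) : has2Loop l = cntStart l := by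
  induction hn : l.length using Nat.strong_induction_on generalizing l with
  | _ n ih =>
    match l with
    | [] => simp [has2Loop, cntStart]
    | [c] => simp [has2Loop, cntStart, cnt]
    | a :: b :: rest =>
      by_cases h : a = b
      · subst h
        have hr : has2Loop rest = cntStart rest := by
          exact ih rest.length (by simp at hn; omega) rest rfl
        calc has2Loop (a :: a :: rest) = 1 + has2Loop rest := by simp [has2Loop]
          _ = 1 + cnt 0 a rest := by rw [hr, cnt_zero]
          _ = cnt 2 a rest := (cnt_add_two rest 0 a).symm
          _ = cntStart (a :: a :: rest) := by simp [cntStart, cnt]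
      · have hr : has2Loop (b :: rest) = cntStart (b :: rest) := by
          exact ih (b :: rest).length (by simp at hn ⊢; omega) (b :: rest) rfl
        have h' : ¬ b = a := fun e => h e.symm
        simp [has2Loop, cntStart, cnt, h, h', hr]

theorem fold_inv (l : List Char) : ∀ t r p,
    (let s := l.foldl altStep (t, r + 1, some p); s.1 + s.2.1 / 2) = t + cnt (r + 1) p l := by
  induction l with
  | nil => intro t r p; simp [cnt]
  | cons c cs ih =>
      intro t r p
      by_cases h : p = c
      · subst h
        simpa [altStep, cnt] using ih t (r + 1) p
      · have h' : ¬ c = p := fun e => h e.symm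
        simpa [altStep, h, h', cnt, Nat.add_assoc] using ih (t + (r + 1) / 2) 0 c

-- ===== VERDICT (by name: the statement is the Claim_ definition above) =====
theorem has_2_pairs_spec : Claim_equal_has_2_pairs := by
  intro seq _
  unfold Spec_has_2_pairs has_2_pairs has_2_pairs_alt
  cases hl : seq.toList with
  | nil => simp [has2Loop]
  | cons c cs =>
      have h1 := fold_inv cs 0 0 c
      have h2 := has2Loop_eq_cntStart (c :: cs)
      simp only [cntStart] at h2
      simp only [List.foldl_cons, altStep]
      simp only [ne_eq, not_true_eq_false, false_and, if_false] at *
      simp at h1 ⊢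
      rw [h2]
      omega
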